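-- pv_equiv track=rewrite | github.com/byted/AdventOfCode-2021 | 03/solve.py | most_and_least_common_bit
-- ===== SOURCE A (Python) =====
-- def most_and_least_common_bit(values, pos, return_numbers=False):
--     counter = 0
--     numbers = { '0': [], '1': [] }
--     for v in values:
--         if v[pos] == '1':
--             counter += 1
--         else:
--             counter -= 1
--
--         if return_numbers:
--             numbers[v[pos]].append(v)
--
--     return counter, numbers
-- ===== SOURCE B (Python) =====
-- def _mlcb(vals, pos):
--     # divide and conquer: counting and bucketing are monoid folds, so any split order works
--     n = len(vals)
--     if n == 0:
--         return 0, [], []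
--     if n == 1:
--         v = vals[0]
--         if v[pos] == '1':
--             return 1, [], [v]
--         return -1, [v], []
--     mid = n // 2
--     c1, z1, o1 = _mlcb(vals[:mid], pos)
--     c2, z2, o2 = _mlcb(vals[mid:], pos)
--     return c1 + c2, z1 + z2, o1 + o2
--
-- def most_and_least_common_bit(values, pos, return_numbers=False):
--     c, z, o = _mlcb(list(values), pos)
--     return c, ({'0': z, '1': o} if return_numbers else {'0': [], '1': []})
-- ===== Notes on version B (the rewrite author's own statement) =====
-- stated objective: alternative
-- what changed: Replaces A's single stateful left-to-right loop (interleaved +1/-1 counter and dict mutation) by a recursive divide-and-conquer: split the list in half, recurse, and merge (sum counters, concatenate buckets), which is correct because both quantities are associative monoid folds; the dict is assembled once at the end.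
import Mathlib
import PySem

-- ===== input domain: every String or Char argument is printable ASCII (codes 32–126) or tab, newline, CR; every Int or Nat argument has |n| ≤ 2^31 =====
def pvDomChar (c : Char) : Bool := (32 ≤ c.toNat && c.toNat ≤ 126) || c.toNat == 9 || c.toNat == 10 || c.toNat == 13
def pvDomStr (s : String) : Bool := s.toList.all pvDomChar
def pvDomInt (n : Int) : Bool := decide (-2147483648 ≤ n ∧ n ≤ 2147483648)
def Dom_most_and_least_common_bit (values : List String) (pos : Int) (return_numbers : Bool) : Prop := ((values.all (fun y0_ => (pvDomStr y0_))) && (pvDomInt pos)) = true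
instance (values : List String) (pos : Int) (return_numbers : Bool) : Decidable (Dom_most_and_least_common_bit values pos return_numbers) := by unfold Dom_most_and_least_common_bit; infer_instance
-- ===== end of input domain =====

-- B replaces A's stateful left-to-right loop by a divide-and-conquer recursion
-- (split in half, recurse, merge counters and buckets); objective: alternative decomposition.

-- ===== PORT A =====
-- helper for A: the in-place 'numbers[k].append(v)' on the assoc list (unchanged if k absent; KeyError excluded by Pre_)
def pvAppendAt (d : List (String × List String)) (k : String) (v : String) : List (String × List String) :=
  d.map (fun p => if p.1 = k then (p.1, p.2 ++ [v]) else p)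

-- the loop body of A (one iteration of 'for v in values')
def pvStepA (pos : Int) (return_numbers : Bool) (st : Int × (List (String × List String))) (v : String) : Int × (List (String × List String)) :=
  match PySem.Str.pyGet? v pos with
  | none => st  -- IndexError in Python; excluded by Pre_
  | some c =>
    let counter := if c = '1' then st.1 + 1 else st.1 - 1
    let numbers := if return_numbers then pvAppendAt st.2 (String.ofList [c]) v else st.2
    (counter, numbers)

def most_and_least_common_bit (values : List String) (pos : Int) (return_numbers : Bool) : Int × (List (String × List String)) :=
  values.foldl (pvStepA pos return_numbers) (0, [("0", []), ("1", [])])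

-- ===== PORT B =====
-- _mlcb of Source B: divide-and-conquer returning (counter, zero-bucket, one-bucket);
-- vals[:mid]/vals[mid:] with 0 ≤ mid ≤ n are List.take/List.drop exactly.
def pvMlcb (vals : List String) (pos : Int) : Int × List String × List String :=
  match vals with
  | [] => (0, [], [])
  | [v] =>
    match PySem.Str.pyGet? v pos with
    | some '1' => (1, [], [v])
    | _ => (-1, [v], [])   -- Python raises IndexError when pyGet? is none; excluded by Pre_
  | v₁ :: v₂ :: rest =>
    let n := (v₁ :: v₂ :: rest).length
    let mid := n / 2
    let r₁ := pvMlcb ((v₁ :: v₂ :: rest).take mid) pos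
    let r₂ := pvMlcb ((v₁ :: v₂ :: rest).drop mid) pos
    (r₁.1 + r₂.1, r₁.2.1 ++ r₂.2.1, r₁.2.2 ++ r₂.2.2)
termination_by vals.length
decreasing_by
  · simp; omega
  · simp; omega

def most_and_least_common_bit_alt (values : List String) (pos : Int) (return_numbers : Bool) : Int × (List (String × List String)) :=
  let r := pvMlcb values pos
  (r.1, if return_numbers then [("0", r.2.1), ("1", r.2.2)] else [("0", []), ("1", [])])

-- ===== PRECONDITION & SPEC =====
-- Pre_ excludes exactly the inputs where A raises: a value whose pos index is out of range
-- (IndexError), and, when return_numbers is true, a value whose character at pos is neither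
-- '0' nor '1' (KeyError on numbers[v[pos]]).
def Pre_most_and_least_common_bit (values : List String) (pos : Int) (return_numbers : Bool) : Prop :=
  ∀ v ∈ values, PySem.Raise.InRange v.toList.length pos ∧
    (return_numbers = true → PySem.Str.pyGet? v pos = some '0' ∨ PySem.Str.pyGet? v pos = some '1')
instance (values : List String) (pos : Int) (return_numbers : Bool) : Decidable (Pre_most_and_least_common_bit values pos return_numbers) := by unfold Pre_most_and_least_common_bit; infer_instance
def pvWitness_most_and_least_common_bit : List String × Int × Bool := (["10", "01", "11"], 0, true)

def Spec_most_and_least_common_bit (values : List String) (pos : Int) (return_numbers : Bool) (out : Int × (List (String × List String))) : Prop := out = most_and_least_common_bit_alt values pos return_numbers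
instance (values : List String) (pos : Int) (return_numbers : Bool) (out : Int × (List (String × List String))) : Decidable (Spec_most_and_least_common_bit values pos return_numbers out) := by unfold Spec_most_and_least_common_bit; infer_instance

-- ===== CLAIM (what is proved, stated in full; the proofs are below) =====
def Claim_equal_most_and_least_common_bit : Prop := ∀ (values : List String) (pos : Int) (return_numbers : Bool), Dom_most_and_least_common_bit values pos return_numbers → Pre_most_and_least_common_bit values pos return_numbers → Spec_most_and_least_common_bit values pos return_numbers (most_and_least_common_bit values pos return_numbers)

-- ===== LEMMAS AND PROOFS =====

-- characterisation of B's recursion: it computes the filters and their length difference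
theorem pvMlcb_eq (pos : Int) : ∀ (n : Nat) (vals : List String), vals.length ≤ n →
    pvMlcb vals pos =
      (((vals.filter (fun v => PySem.Str.pyGet? v pos == some '1')).length : Int)
         - ((vals.filter (fun v => !(PySem.Str.pyGet? v pos == some '1'))).length : Int),
       vals.filter (fun v => !(PySem.Str.pyGet? v pos == some '1')),
       vals.filter (fun v => PySem.Str.pyGet? v pos == some '1')) := by
  intro n
  induction n with
  | zero =>
    intro vals h
    have : vals = [] := List.eq_nil_of_length_eq_zero (Nat.le_zero.mp h)
    subst this; simp [pvMlcb]
  | succ m ih =>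
    intro vals h
    match vals with
    | [] => simp [pvMlcb]
    | [v] =>
      rw [pvMlcb]
      cases hg : PySem.Str.pyGet? v pos with
      | none =>
        have hg' := hg
        simp only [PySem.Str.pyGet?_eq, PySem.Chars.pyGet?_eq_listPyGet?] at hg'
        simp [hg']
      | some c =>
        have hg' := hg
        simp only [PySem.Str.pyGet?_eq, PySem.Chars.pyGet?_eq_listPyGet?] at hg'
        by_cases h1 : c = '1'
        · subst h1; simp [hg']
        · split
          · rename_i heq; exact absurd (Option.some.inj heq) h1
          · simp [hg', h1]
    | v₁ :: v₂ :: rest =>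
      rw [pvMlcb]
      have hlen : (v₁ :: v₂ :: rest).length = rest.length + 2 := by simp
      set vs := v₁ :: v₂ :: rest with hvs
      have hmid : vs.length / 2 < vs.length := by rw [hlen]; omega
      have h1 : (vs.take (vs.length / 2)).length ≤ m := by
        simp only [List.length_take]
        have := h; rw [hlen] at this ⊢; omega
      have h2 : (vs.drop (vs.length / 2)).length ≤ m := by
        simp only [List.length_drop]
        have := h; rw [hlen] at this ⊢; omega
      rw [ih _ h1, ih _ h2]
      have hsplit : vs.take (vs.length / 2) ++ vs.drop (vs.length / 2) = vs :=
        List.take_append_drop _ _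
      conv_rhs => rw [← hsplit]
      simp only [List.filter_append, List.length_append]
      refine Prod.ext ?_ rfl
      push_cast
      ring

-- A's loop with return_numbers = false: counter only
theorem pvFoldA_false (pos : Int) : ∀ (values : List String) (c : Int) (d : List (String × List String)),
    (∀ v ∈ values, PySem.Raise.InRange v.toList.length pos) →
    values.foldl (pvStepA pos false) (c, d) =
      (c + ((values.filter (fun v => PySem.Str.pyGet? v pos == some '1')).length : Int)
         - ((values.filter (fun v => !(PySem.Str.pyGet? v pos == some '1'))).length : Int), d) := by
  intro values
  induction values with
  | nil => intro c d _; simp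
  | cons v vs ih =>
    intro c d h
    have hin := h v (by simp)
    have hrest : ∀ w ∈ vs, PySem.Raise.InRange w.toList.length pos := fun w hw => h w (by simp [hw])
    obtain ⟨ch, hch⟩ : ∃ ch, PySem.Str.pyGet? v pos = some ch := by
      cases hg : PySem.Str.pyGet? v pos with
      | none =>
        exfalso
        simp only [PySem.Str.pyGet?_eq, PySem.Chars.pyGet?_eq_listPyGet?,
          PySem.List.pyGet?_eq_none_iff] at hg
        exact hg hin
      | some ch => exact ⟨ch, rfl⟩
    simp only [PySem.Str.pyGet?_eq, PySem.Chars.pyGet?_eq_listPyGet?] at hch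
    by_cases h1 : ch = '1'
    · subst h1
      have hstep : pvStepA pos false (c, d) v = (c + 1, d) := by simp [pvStepA, hch]
      rw [List.foldl_cons, hstep, ih (c + 1) d hrest]
      simp [hch]
      try ring
      try omega
    · have hstep : pvStepA pos false (c, d) v = (c - 1, d) := by simp [pvStepA, hch, h1]
      rw [List.foldl_cons, hstep, ih (c - 1) d hrest]
      simp [hch, h1]
      try ring
      try omega

-- A's loop with return_numbers = true: counter and buckets
theorem pvFoldA_true (pos : Int) : ∀ (values : List String) (c : Int) (zs os : List String),
    (∀ v ∈ values, PySem.Str.pyGet? v pos = some '0' ∨ PySem.Str.pyGet? v pos = some '1') →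
    values.foldl (pvStepA pos true) (c, [("0", zs), ("1", os)]) =
      (c + ((values.filter (fun v => PySem.Str.pyGet? v pos == some '1')).length : Int)
         - ((values.filter (fun v => !(PySem.Str.pyGet? v pos == some '1'))).length : Int),
       [("0", zs ++ values.filter (fun v => !(PySem.Str.pyGet? v pos == some '1'))),
        ("1", os ++ values.filter (fun v => PySem.Str.pyGet? v pos == some '1'))]) := by
  intro values
  induction values with
  | nil => intro c zs os _; simp
  | cons v vs ih =>
    intro c zs os h
    have hrest : ∀ w ∈ vs, PySem.Str.pyGet? w pos = some '0' ∨ PySem.Str.pyGet? w pos = some '1' :=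
      fun w hw => h w (by simp [hw])
    rcases h v (by simp) with hch | hch <;>
      simp only [PySem.Str.pyGet?_eq, PySem.Chars.pyGet?_eq_listPyGet?] at hch
    · -- v[pos] = '0'
      have hstep : pvStepA pos true (c, [("0", zs), ("1", os)]) v =
          (c - 1, [("0", zs ++ [v]), ("1", os)]) := by
        simp [pvStepA, hch, pvAppendAt]
      rw [List.foldl_cons, hstep, ih (c - 1) (zs ++ [v]) os hrest]
      simp [hch]
      try ring
      try omega
    · -- v[pos] = '1'
      have hstep : pvStepA pos true (c, [("0", zs), ("1", os)]) v =
          (c + 1, [("0", zs), ("1", os ++ [v])]) := by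
        simp [pvStepA, hch, pvAppendAt]
      rw [List.foldl_cons, hstep, ih (c + 1) zs (os ++ [v]) hrest]
      simp [hch]
      try ring
      try omega

-- ===== VERDICT (by name: the statement is the Claim_ definition above) =====
theorem most_and_least_common_bit_spec : Claim_equal_most_and_least_common_bit := by
  intro values pos rn _ hpre
  unfold Spec_most_and_least_common_bit most_and_least_common_bit most_and_least_common_bit_alt
  rw [pvMlcb_eq pos values.length values (le_refl _)]
  cases rn with
  | false =>
    rw [pvFoldA_false pos values 0 _ (fun v hv => (hpre v hv).1)]
    simp
  | true =>
    rw [pvFoldA_true pos values 0 [] [] (fun v hv => (hpre v hv).2 rfl)]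
    simp
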